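-- pv_equiv track=rewrite | github.com/tonysoutha/csci1133 | browniantree.py | hasNeighbor
-- ===== SOURCE A (Python) =====
-- def hasNeighbor(grid,row,col):
--     valid = False
--     if row > 199 or col > 199:
--         return valid
--     else:
--         e = grid[row+1][col]
--         n = grid[row][col+1]
--         ne = grid[row+1][col+1]
--         w = grid[row-1][col]
--         s = grid[row][col-1]
--         sw = grid[row-1][col-1]
--         se = grid[row+1][col-1]
--         nw = grid[row-1][col+1]
--
--         if row == 0 and col == 0:
--             loc = [e,n,ne]
--         elif row == 0 and col == 199:
--             loc = [e,s,se]
--         elif row == 199 and col == 0: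
--             loc = [w,n,nw]
--         elif row == 199 and col == 199:
--             loc = [w,s,sw]
--
--         elif row in range(1,199) and col == 0:
--             loc = [n,e,w,ne,nw]
--         elif row in range(1,199) and col == 199:
--             loc = [s,e,w,se,sw]
--         elif row == 0 and col in range(1,199):
--             loc = [n,s,e,ne,se]
--         elif row == 199 and col in range(1,199):
--             loc = [n,s,w,nw,sw]
--         else:
--             loc = [n,s,e,w,ne,nw,se,sw]
--
--         for each in loc:
--             if each == True:
--                 if grid[row][col] == False:
--                     valid = True
--         return valid
-- ===== SOURCE B (Python) =====
-- def hasNeighbor(grid, row, col):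
--     if row > 199 or col > 199:
--         return False
--     if grid[row][col]:
--         return False
--     if row < 0 or col < 0:
--         return False
--     active = False
--     for dr in (-1, 0, 1):
--         for dc in (-1, 0, 1):
--             if (dr or dc) and 0 <= row + dr <= 199 and 0 <= col + dc <= 199:
--                 if grid[row + dr][col + dc]:
--                     active = True
--     return active
-- ===== Notes on version B (the rewrite author's own statement) =====
-- stated objective: simpler
-- what changed: Replaces A's nine-branch corner/edge selection chain by one uniform scan of the 3x3 neighbourhood with a plain bounds check, and rejects off-board coordinates instead of wrapping.
-- intended difference: On negative row or col (with row,col <= 199) whose wrapped-around centre cell is empty and some wrapped-around neighbour is occupied, A answers the off-board query True through Python's negative-index wraparound; B returns False, the intended answer for a cell that is not on the board. — e.g. on hasNeighbor([[true, false], [false, false]], -1, 0): A returns true, B returns false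
import Mathlib
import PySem

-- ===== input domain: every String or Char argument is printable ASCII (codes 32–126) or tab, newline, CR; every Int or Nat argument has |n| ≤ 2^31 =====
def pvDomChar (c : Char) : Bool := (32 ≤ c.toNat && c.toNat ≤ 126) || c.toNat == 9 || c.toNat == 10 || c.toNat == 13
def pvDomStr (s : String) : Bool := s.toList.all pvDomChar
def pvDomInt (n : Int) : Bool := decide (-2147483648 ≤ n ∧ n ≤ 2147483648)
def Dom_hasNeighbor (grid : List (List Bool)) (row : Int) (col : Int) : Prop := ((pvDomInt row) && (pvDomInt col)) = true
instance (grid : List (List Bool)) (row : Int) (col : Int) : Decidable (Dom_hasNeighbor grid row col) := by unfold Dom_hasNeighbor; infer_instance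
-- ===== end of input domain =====

-- B replaces A's nine-branch neighbour-selection chain by one uniform scan of the
-- 3x3 neighbourhood with a plain bounds check, rejecting off-board coordinates
-- instead of wrapping (objective: simpler; intended difference stated in D_).

-- shared 2D indexing primitive, Python's grid[i][j] (value only claimed under Pre_)
def pvCell (grid : List (List Bool)) (i j : Int) : Bool :=
  (PySem.List.pyGet? ((PySem.List.pyGet? grid i).getD []) j).getD false

-- ===== PORT A =====
def hasNeighbor (grid : List (List Bool)) (row : Int) (col : Int) : Bool :=
  if row > 199 ∨ col > 199 then false
  else
    let e  := pvCell grid (row+1) col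
    let n  := pvCell grid row (col+1)
    let ne := pvCell grid (row+1) (col+1)
    let w  := pvCell grid (row-1) col
    let s  := pvCell grid row (col-1)
    let sw := pvCell grid (row-1) (col-1)
    let se := pvCell grid (row+1) (col-1)
    let nw := pvCell grid (row-1) (col+1)
    let loc : List Bool :=
      if row = 0 ∧ col = 0 then [e,n,ne]
      else if row = 0 ∧ col = 199 then [e,s,se]
      else if row = 199 ∧ col = 0 then [w,n,nw]
      else if row = 199 ∧ col = 199 then [w,s,sw]
      else if (1 ≤ row ∧ row ≤ 198) ∧ col = 0 then [n,e,w,ne,nw]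
      else if (1 ≤ row ∧ row ≤ 198) ∧ col = 199 then [s,e,w,se,sw]
      else if row = 0 ∧ (1 ≤ col ∧ col ≤ 198) then [n,s,e,ne,se]
      else if row = 199 ∧ (1 ≤ col ∧ col ≤ 198) then [n,s,w,nw,sw]
      else [n,s,e,w,ne,nw,se,sw]
    loc.foldl (fun valid each =>
      if each == true then
        if pvCell grid row col == false then true else valid
      else valid) false

-- ===== PORT B =====
def hasNeighbor_alt (grid : List (List Bool)) (row : Int) (col : Int) : Bool :=
  if row > 199 ∨ col > 199 then false
  else if pvCell grid row col then false
  else if row < 0 ∨ col < 0 then false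
  else
    ([-1, 0, 1] : List Int).foldl (fun active dr =>
      ([-1, 0, 1] : List Int).foldl (fun active dc =>
        if (!(dr == 0 && dc == 0)) &&
           decide (0 ≤ row + dr ∧ row + dr ≤ 199) &&
           decide (0 ≤ col + dc ∧ col + dc ≤ 199) &&
           pvCell grid (row + dr) (col + dc)
        then true else active) active) false

-- ===== PRECONDITION & SPEC =====
-- Pre_ excludes exactly the inputs where Python A raises IndexError: unless the
-- row>199/col>199 guard returns early, each of A's eight neighbour reads
-- grid[r][c] needs r in range for grid and c in range for that row (Python's
-- signed-index rule).
def pvRowLen (grid : List (List Bool)) (i : Int) : Nat :=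
  ((PySem.List.pyGet? grid i).getD []).length

def Pre_hasNeighbor (grid : List (List Bool)) (row : Int) (col : Int) : Prop :=
  row > 199 ∨ col > 199 ∨
    (PySem.Raise.InRange grid.length (row+1) ∧
     PySem.Raise.InRange grid.length row ∧
     PySem.Raise.InRange grid.length (row-1) ∧
     PySem.Raise.InRange (pvRowLen grid (row+1)) col ∧
     PySem.Raise.InRange (pvRowLen grid (row+1)) (col+1) ∧
     PySem.Raise.InRange (pvRowLen grid (row+1)) (col-1) ∧
     PySem.Raise.InRange (pvRowLen grid row) (col+1) ∧
     PySem.Raise.InRange (pvRowLen grid row) (col-1) ∧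
     PySem.Raise.InRange (pvRowLen grid (row-1)) col ∧
     PySem.Raise.InRange (pvRowLen grid (row-1)) (col+1) ∧
     PySem.Raise.InRange (pvRowLen grid (row-1)) (col-1))

instance (grid : List (List Bool)) (row : Int) (col : Int) : Decidable (Pre_hasNeighbor grid row col) := by
  unfold Pre_hasNeighbor; infer_instance

def pvWitness_hasNeighbor : List (List Bool) × Int × Int :=
  ([[false, true, false], [false, false, false], [false, false, false]], 1, 1)

-- the entry Python's signed index lands on, by wrap (modular) arithmetic;
-- used only to state D_ on the input
def pvW {α : Type} (d : α) (xs : List α) (i : Int) : α :=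
  xs.getD (i % (xs.length : Int)).toNat d

-- On negative row or col (with row,col ≤ 199) whose wrapped-around centre cell is
-- empty and which have an occupied wrapped-around neighbour, A answers the
-- off-board query True through Python's negative-index wraparound, reading cells
-- from the opposite side of the grid; B returns False, the intended answer for a
-- cell that is not on the board.
def D_hasNeighbor (grid : List (List Bool)) (row : Int) (col : Int) : Prop :=
  max row col ≤ 199 ∧ min row col < 0 ∧ ¬pvW false (pvW [] grid row) col ∧
  ∃ dr ∈ ({-1, 0, 1} : Finset Int), ∃ dc ∈ ({-1, 0, 1} : Finset Int),
    pvW false (pvW [] grid (row + dr)) (col + dc)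

instance (grid : List (List Bool)) (row : Int) (col : Int) : Decidable (D_hasNeighbor grid row col) := by
  unfold D_hasNeighbor; infer_instance

def Spec_hasNeighbor (grid : List (List Bool)) (row : Int) (col : Int) (out : Bool) : Prop := ¬ D_hasNeighbor grid row col → out = hasNeighbor_alt grid row col
instance (grid : List (List Bool)) (row : Int) (col : Int) (out : Bool) : Decidable (Spec_hasNeighbor grid row col out) := by unfold Spec_hasNeighbor; infer_instance

def pvDiffWitness_hasNeighbor : List (List Bool) × Int × Int :=
  ([[true, false], [false, false]], -1, 0)

def pvDiffWitnessOut_hasNeighbor : Bool × Bool := (true, false)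

-- ===== CLAIM (what is proved, stated in full; the proofs are below) =====
def Claim_unchanged_hasNeighbor : Prop := ∀ (grid : List (List Bool)) (row : Int) (col : Int), Dom_hasNeighbor grid row col → Pre_hasNeighbor grid row col → Spec_hasNeighbor grid row col (hasNeighbor grid row col)
def Claim_changed_hasNeighbor : Prop := Dom_hasNeighbor (pvDiffWitness_hasNeighbor.1) (pvDiffWitness_hasNeighbor.2.1) (pvDiffWitness_hasNeighbor.2.2) ∧ Pre_hasNeighbor (pvDiffWitness_hasNeighbor.1) (pvDiffWitness_hasNeighbor.2.1) (pvDiffWitness_hasNeighbor.2.2) ∧ D_hasNeighbor (pvDiffWitness_hasNeighbor.1) (pvDiffWitness_hasNeighbor.2.1) (pvDiffWitness_hasNeighbor.2.2) ∧ hasNeighbor (pvDiffWitness_hasNeighbor.1) (pvDiffWitness_hasNeighbor.2.1) (pvDiffWitness_hasNeighbor.2.2) = pvDiffWitnessOut_hasNeighbor.1 ∧ hasNeighbor_alt (pvDiffWitness_hasNeighbor.1) (pvDiffWitness_hasNeighbor.2.1) (pvDiffWitness_hasNeighbor.2.2) = pvDiffWitnessOut_hasNeighbor.2 ∧ pvDiffWitnessOut_hasNeighbor.1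 ≠ pvDiffWitnessOut_hasNeighbor.2
def Claim_exact_hasNeighbor : Prop := ∀ (grid : List (List Bool)) (row : Int) (col : Int), Dom_hasNeighbor grid row col → Pre_hasNeighbor grid row col → D_hasNeighbor grid row col → hasNeighbor grid row col ≠ hasNeighbor_alt grid row col

-- ===== LEMMAS AND PROOFS =====

-- A's neighbour loop: valid ends true iff some listed cell is true and the centre is false
theorem pv_foldl_loc (c : Bool) (loc : List Bool) (init : Bool) :
    loc.foldl (fun valid each =>
      if each == true then (if c == false then true else valid) else valid) init
    = (init || (loc.any (fun x => x) && !c)) := by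
  induction loc generalizing init with
  | nil => simp
  | cons h t ih =>
    simp only [List.foldl_cons, List.any_cons, ih]
    cases h <;> cases c <;> cases init <;> simp

-- B's flag loop: a fold that only ever sets the flag is List.any
theorem pv_foldl_set {α : Type} (p : α → Bool) (l : List α) (init : Bool) :
    l.foldl (fun a x => if p x then true else a) init = (init || l.any p) := by
  induction l generalizing init with
  | nil => simp
  | cons h t ih =>
    simp only [List.foldl_cons, List.any_cons, ih]
    cases p h <;> cases init <;> simp

theorem pv_foldl_nested (p : Int → Int → Bool) (l₁ l₂ : List Int) (init : Bool) :
    l₁.foldl (fun a dr => l₂.foldl (fun a dc => if p dr dc then true else a) a) init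
    = (init || l₁.any fun dr => l₂.any fun dc => p dr dc) := by
  induction l₁ generalizing init with
  | nil => simp
  | cons h t ih =>
    rw [List.foldl_cons, pv_foldl_set, ih]
    simp [List.any_cons, Bool.or_assoc]

-- a Python signed-index read that is in range equals the wrap-arithmetic read
theorem pvGetD_wrap {α : Type} (xs : List α) (i : Int) (d : α)
    (h : PySem.Raise.InRange xs.length i) :
    (PySem.List.pyGet? xs i).getD d = xs.getD (i % (xs.length : Int)).toNat d := by
  obtain ⟨h1, h2⟩ := h
  unfold PySem.List.pyGet? PySem.List.pyIdx?
  by_cases h0 : 0 ≤ i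
  · rw [if_pos h0, if_pos h2]
    have : i % (xs.length : Int) = i := Int.emod_eq_of_lt h0 h2
    rw [this]
    simp [List.getD]
  · rw [if_neg h0, if_pos h1]
    have hmod : i % (xs.length : Int) = i + xs.length := by
      have e1 : (i + xs.length) % (xs.length : Int) = i % xs.length := by
        simp
      rw [← e1, Int.emod_eq_of_lt (by omega) (by omega)]
    rw [hmod]
    have : xs.length - (-i).toNat = (i + xs.length).toNat := by omega
    rw [this]
    simp [List.getD]

-- proof-side abbreviation for D_'s wrap read
def pvWrap (grid : List (List Bool)) (i j : Int) : Bool :=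
  pvW false (pvW [] grid i) j

theorem pvWrap_eq (grid : List (List Bool)) (i j : Int) :
    pvW false (pvW [] grid i) j = pvWrap grid i j := rfl

theorem pvCell_eq_wrap (grid : List (List Bool)) (i j : Int)
    (h1 : PySem.Raise.InRange grid.length i)
    (h2 : PySem.Raise.InRange (pvRowLen grid i) j) :
    pvCell grid i j = pvWrap grid i j := by
  have hR : (PySem.List.pyGet? grid i).getD ([] : List Bool)
      = grid.getD (i % (grid.length : Int)).toNat [] := pvGetD_wrap _ _ _ h1
  simp only [pvCell, pvWrap, pvW]
  rw [← hR]
  exact pvGetD_wrap _ _ _ h2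

-- D_'s existential neighbour clause, spelt out as the nine wrap reads of the block
theorem pvD_iff (grid : List (List Bool)) (row col : Int) :
    (∃ dr ∈ ({-1, 0, 1} : Finset Int), ∃ dc ∈ ({-1, 0, 1} : Finset Int),
      pvW false (pvW [] grid (row + dr)) (col + dc))
    ↔ (pvWrap grid (row+1) col || pvWrap grid row (col+1) || pvWrap grid (row+1) (col+1) ||
       pvWrap grid (row-1) col || pvWrap grid row (col-1) || pvWrap grid (row-1) (col-1) ||
       pvWrap grid (row+1) (col-1) || pvWrap grid (row-1) (col+1) ||
       pvWrap grid row col) = true := by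
  have hm : ∀ x : Int, x + -1 = x - 1 := fun x => by ring
  constructor
  · rintro ⟨dr, hdr, dc, hdc, hv⟩
    simp only [Finset.mem_insert, Finset.mem_singleton] at hdr hdc
    simp only [Bool.or_eq_true]
    rcases hdr with rfl | rfl | rfl <;> rcases hdc with rfl | rfl | rfl <;>
      rw [pvWrap_eq] at hv <;> simp_all
  · intro hv
    simp only [Bool.or_eq_true] at hv
    rcases hv with (((((((h | h) | h) | h) | h) | h) | h) | h) | h
    · exact ⟨1, by decide, 0, by decide, by simpa [pvWrap_eq] using h⟩
    · exact ⟨0, by decide, 1, by decide, by simpa [pvWrap_eq] using h⟩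
    · exact ⟨1, by decide, 1, by decide, by simpa [pvWrap_eq] using h⟩
    · exact ⟨-1, by decide, 0, by decide, by simpa [pvWrap_eq, hm] using h⟩
    · exact ⟨0, by decide, -1, by decide, by simpa [pvWrap_eq, hm] using h⟩
    · exact ⟨-1, by decide, -1, by decide, by simpa [pvWrap_eq, hm] using h⟩
    · exact ⟨1, by decide, -1, by decide, by simpa [pvWrap_eq, hm] using h⟩
    · exact ⟨-1, by decide, 1, by decide, by simpa [pvWrap_eq, hm] using h⟩
    · exact ⟨0, by decide, 0, by decide, by simpa [pvWrap_eq] using h⟩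

theorem hasNeighbor_eq_alt (grid : List (List Bool)) (row col : Int)
    (h : Pre_hasNeighbor grid row col) (hd : ¬ D_hasNeighbor grid row col) :
    hasNeighbor grid row col = hasNeighbor_alt grid row col := by
  unfold hasNeighbor hasNeighbor_alt
  by_cases hg : row > 199 ∨ col > 199
  · simp only [if_pos hg]
  · by_cases hneg : row < 0 ∨ col < 0
    · -- off-board negative query outside D_: A's loop finds nothing usable, B rejects it
      simp only [if_neg hg]
      simp only [if_neg (show ¬(row = 0 ∧ col = 0) by omega),
          if_neg (show ¬(row = 0 ∧ col = 199) by omega),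
          if_neg (show ¬(row = 199 ∧ col = 0) by omega),
          if_neg (show ¬(row = 199 ∧ col = 199) by omega),
          if_neg (show ¬((1 ≤ row ∧ row ≤ 198) ∧ col = 0) by omega),
          if_neg (show ¬((1 ≤ row ∧ row ≤ 198) ∧ col = 199) by omega),
          if_neg (show ¬(row = 0 ∧ (1 ≤ col ∧ col ≤ 198)) by omega),
          if_neg (show ¬(row = 199 ∧ (1 ≤ col ∧ col ≤ 198)) by omega)]
      rw [pv_foldl_loc]
      rcases h with h' | h' | ⟨R1, R2, R3, C1, C2, C3, C4, C5, C6, C7, C8⟩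
      · exact absurd (Or.inl h') hg
      · exact absurd (Or.inr h') hg
      have CC : PySem.Raise.InRange (pvRowLen grid row) col := by
        unfold PySem.Raise.InRange at C4 C5 ⊢; omega
      rw [pvCell_eq_wrap grid (row+1) col R1 C1,
          pvCell_eq_wrap grid row (col+1) R2 C4,
          pvCell_eq_wrap grid (row+1) (col+1) R1 C2,
          pvCell_eq_wrap grid (row-1) col R3 C6,
          pvCell_eq_wrap grid row (col-1) R2 C5,
          pvCell_eq_wrap grid (row-1) (col-1) R3 C8,
          pvCell_eq_wrap grid (row+1) (col-1) R1 C3,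
          pvCell_eq_wrap grid (row-1) (col+1) R3 C7,
          pvCell_eq_wrap grid row col R2 CC]
      unfold D_hasNeighbor at hd
      cases hc : pvWrap grid row col with
      | true => simp
      | false =>
        rw [if_neg (show ¬(false = true) from by decide), if_pos hneg]
        rw [Bool.false_or]
        simp only [Bool.not_false, Bool.and_true]
        have hor : ¬((pvWrap grid (row+1) col || pvWrap grid row (col+1) ||
            pvWrap grid (row+1) (col+1) || pvWrap grid (row-1) col || pvWrap grid row (col-1) ||
            pvWrap grid (row-1) (col-1) || pvWrap grid (row+1) (col-1) ||
            pvWrap grid (row-1) (col+1) || pvWrap grid row col) = true) :=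
          fun hx => hd ⟨by omega, by omega, by rw [pvWrap_eq]; simp [hc],
            (pvD_iff grid row col).mpr hx⟩
        have hor' := Bool.eq_false_iff.mpr hor
        simp only [Bool.or_eq_false_iff] at hor'
        obtain ⟨⟨⟨⟨⟨⟨⟨⟨x1, x2⟩, x3⟩, x4⟩, x5⟩, x6⟩, x7⟩, x8⟩, x9⟩ := hor'
        simp [x1, x2, x3, x4, x5, x6, x7, x8]
    · have hr0 : 0 ≤ row := by omega
      have hc0 : 0 ≤ col := by omega
      have hr1 : row ≤ 199 := by omega
      have hc1 : col ≤ 199 := by omega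
      simp only [if_neg hg, if_neg (show ¬(row < 0 ∨ col < 0) by omega)]
      rw [pv_foldl_loc, pv_foldl_nested]
      have hm : ∀ x : Int, x + -1 = x - 1 := fun x => by ring
      simp only [List.any_cons, List.any_nil, hm]
      simp only [Bool.or_false, Bool.false_or]
      simp only [add_zero]
      generalize pvCell grid (row+1) col = e
      generalize pvCell grid row (col+1) = n
      generalize pvCell grid (row+1) (col+1) = ne
      generalize pvCell grid (row-1) col = w
      generalize pvCell grid row (col-1) = s
      generalize pvCell grid (row-1) (col-1) = sw
      generalize pvCell grid (row+1) (col-1) = se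
      generalize pvCell grid (row-1) (col+1) = nw
      generalize pvCell grid row col = c
      have hA : ∀ tv : Bool, (row = 0 → tv = false) → (1 ≤ row → tv = true) →
          decide (0 ≤ row - 1 ∧ row - 1 ≤ 199) = tv := by
        intro tv t0 t1
        by_cases hq : row = 0
        · rw [t0 hq]; simp only [decide_eq_false_iff_not]; omega
        · rw [t1 (by omega)]; simp only [decide_eq_true_eq]; omega
      have hB : ∀ tv : Bool, (row = 199 → tv = false) → (row ≤ 198 → tv = true) →
          decide (0 ≤ row + 1 ∧ row + 1 ≤ 199) = tv := by
        intro tv t0 t1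
        by_cases hq : row = 199
        · rw [t0 hq]; simp only [decide_eq_false_iff_not]; omega
        · rw [t1 (by omega)]; simp only [decide_eq_true_eq]; omega
      have hC : ∀ tv : Bool, (col = 0 → tv = false) → (1 ≤ col → tv = true) →
          decide (0 ≤ col - 1 ∧ col - 1 ≤ 199) = tv := by
        intro tv t0 t1
        by_cases hq : col = 0
        · rw [t0 hq]; simp only [decide_eq_false_iff_not]; omega
        · rw [t1 (by omega)]; simp only [decide_eq_true_eq]; omega
      have hD : ∀ tv : Bool, (col = 199 → tv = false) → (col ≤ 198 → tv = true) →
          decide (0 ≤ col + 1 ∧ col + 1 ≤ 199) = tv := by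
        intro tv t0 t1
        by_cases hq : col = 199
        · rw [t0 hq]; simp only [decide_eq_false_iff_not]; omega
        · rw [t1 (by omega)]; simp only [decide_eq_true_eq]; omega
      have hE : decide (0 ≤ row ∧ row ≤ 199) = true := by
        simp only [decide_eq_true_eq]; omega
      have hF : decide (0 ≤ col ∧ col ≤ 199) = true := by
        simp only [decide_eq_true_eq]; omega
      cases c with
      | true => simp
      | false =>
      rw [if_neg (show ¬(false = true) from by decide)]
      simp only [Bool.not_false, Bool.and_true]
      split_ifs with h1 h2 h3 h4 h5 h6 h7 h8
      · rw [hA false (fun _ => rfl) (by omega), hB true (by omega) (fun _ => rfl),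
            hC false (fun _ => rfl) (by omega), hD true (by omega) (fun _ => rfl), hE, hF]
        cases e <;> cases n <;> cases ne <;> cases w <;> cases s <;> cases sw <;> cases se <;> cases nw <;> decide
      · rw [hA false (fun _ => rfl) (by omega), hB true (by omega) (fun _ => rfl),
            hC true (by omega) (fun _ => rfl), hD false (fun _ => rfl) (by omega), hE, hF]
        cases e <;> cases n <;> cases ne <;> cases w <;> cases s <;> cases sw <;> cases se <;> cases nw <;> decide
      · rw [hA true (by omega) (fun _ => rfl), hB false (fun _ => rfl) (by omega),
            hC false (fun _ => rfl) (by omega), hD true (by omega) (fun _ => rfl), hE, hF]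
        cases e <;> cases n <;> cases ne <;> cases w <;> cases s <;> cases sw <;> cases se <;> cases nw <;> decide
      · rw [hA true (by omega) (fun _ => rfl), hB false (fun _ => rfl) (by omega),
            hC true (by omega) (fun _ => rfl), hD false (fun _ => rfl) (by omega), hE, hF]
        cases e <;> cases n <;> cases ne <;> cases w <;> cases s <;> cases sw <;> cases se <;> cases nw <;> decide
      · rw [hA true (by omega) (fun _ => rfl), hB true (by omega) (fun _ => rfl),
            hC false (fun _ => rfl) (by omega), hD true (by omega) (fun _ => rfl), hE, hF]
        cases e <;> cases n <;> cases ne <;> cases w <;> cases s <;> cases sw <;> cases se <;> cases nw <;> decide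
      · rw [hA true (by omega) (fun _ => rfl), hB true (by omega) (fun _ => rfl),
            hC true (by omega) (fun _ => rfl), hD false (fun _ => rfl) (by omega), hE, hF]
        cases e <;> cases n <;> cases ne <;> cases w <;> cases s <;> cases sw <;> cases se <;> cases nw <;> decide
      · rw [hA false (fun _ => rfl) (by omega), hB true (by omega) (fun _ => rfl),
            hC true (by omega) (fun _ => rfl), hD true (by omega) (fun _ => rfl), hE, hF]
        cases e <;> cases n <;> cases ne <;> cases w <;> cases s <;> cases sw <;> cases se <;> cases nw <;> decide
      · rw [hA true (by omega) (fun _ => rfl), hB false (fun _ => rfl) (by omega),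
            hC true (by omega) (fun _ => rfl), hD true (by omega) (fun _ => rfl), hE, hF]
        cases e <;> cases n <;> cases ne <;> cases w <;> cases s <;> cases sw <;> cases se <;> cases nw <;> decide
      · rw [hA true (by omega) (fun _ => rfl), hB true (by omega) (fun _ => rfl),
            hC true (by omega) (fun _ => rfl), hD true (by omega) (fun _ => rfl), hE, hF]
        cases e <;> cases n <;> cases ne <;> cases w <;> cases s <;> cases sw <;> cases se <;> cases nw <;> decide

-- ===== VERDICT (by name: the statement is the Claim_ definition above) =====
theorem hasNeighbor_spec : Claim_unchanged_hasNeighbor := by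
  intro grid row col _ hpre hd
  exact hasNeighbor_eq_alt grid row col hpre hd

theorem hasNeighbor_changed : Claim_changed_hasNeighbor := by
  unfold Claim_changed_hasNeighbor; decide

theorem hasNeighbor_tight : Claim_exact_hasNeighbor := by
  intro grid row col _ hpre hd
  obtain ⟨h1, h2, hc', horE⟩ := hd
  have hneg : row < 0 ∨ col < 0 := by omega
  have hc : pvWrap grid row col = false := by
    rw [← pvWrap_eq]; simpa using hc'
  have hor := (pvD_iff grid row col).mp horE
  have hgd : ¬(row > 199 ∨ col > 199) := by omega
  rcases hpre with h' | h' | ⟨R1, R2, R3, C1, C2, C3, C4, C5, C6, C7, C8⟩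
  · exact absurd (Or.inl h') hgd
  · exact absurd (Or.inr h') hgd
  have CC : PySem.Raise.InRange (pvRowLen grid row) col := by
    unfold PySem.Raise.InRange at C4 C5 ⊢; omega
  have hB : hasNeighbor_alt grid row col = false := by
    unfold hasNeighbor_alt
    rw [if_neg hgd, pvCell_eq_wrap grid row col R2 CC, hc]
    rw [if_neg (show ¬(false = true) from by decide), if_pos hneg]
  have hA : hasNeighbor grid row col = true := by
    unfold hasNeighbor
    simp only [if_neg (show ¬(row > 199 ∨ col > 199) by omega)]
    simp only [if_neg (show ¬(row = 0 ∧ col = 0) by omega),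
        if_neg (show ¬(row = 0 ∧ col = 199) by omega),
        if_neg (show ¬(row = 199 ∧ col = 0) by omega),
        if_neg (show ¬(row = 199 ∧ col = 199) by omega),
        if_neg (show ¬((1 ≤ row ∧ row ≤ 198) ∧ col = 0) by omega),
        if_neg (show ¬((1 ≤ row ∧ row ≤ 198) ∧ col = 199) by omega),
        if_neg (show ¬(row = 0 ∧ (1 ≤ col ∧ col ≤ 198)) by omega),
        if_neg (show ¬(row = 199 ∧ (1 ≤ col ∧ col ≤ 198)) by omega)]
    rw [pv_foldl_loc]
    rw [pvCell_eq_wrap grid (row+1) col R1 C1,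
        pvCell_eq_wrap grid row (col+1) R2 C4,
        pvCell_eq_wrap grid (row+1) (col+1) R1 C2,
        pvCell_eq_wrap grid (row-1) col R3 C6,
        pvCell_eq_wrap grid row (col-1) R2 C5,
        pvCell_eq_wrap grid (row-1) (col-1) R3 C8,
        pvCell_eq_wrap grid (row+1) (col-1) R1 C3,
        pvCell_eq_wrap grid (row-1) (col+1) R3 C7,
        pvCell_eq_wrap grid row col R2 CC]
    rw [hc]
    simp only [List.any_cons, List.any_nil, Bool.not_false, Bool.and_true,
      Bool.or_false, Bool.false_or]
    simp only [hc, Bool.or_false] at hor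
    simp only [Bool.or_eq_true] at hor ⊢
    tauto
  rw [hA, hB]; decide
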